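-- pv_equiv track=rewrite | github.com/rgutzen/DynVision | dynvision/visualization/plot_experiment.py | order_layers
-- ===== SOURCE A (Python) =====
-- def order_layers(layer_names):
--     """Order layers according to visual hierarchy: IT, V4, V2, V1 (top to bottom)"""
--     # Define the preferred order mapping
--     layer_order = {
--         "layer1": "V1",
--         "layer2": "V2",
--         "layer3": "V4",
--         "layer4": "IT",
--         "classifier": "classifier",  # Will be filtered out
--     }
--
--     # Filter out classifier and sort by hierarchy (IT at top, V1 at bottom)
--     hierarchy_order = ["IT", "V4", "V2", "V1"]
--
--     # Filter out classifier layers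
--     filtered_layers = [
--         layer for layer in layer_names if "classifier" not in layer.lower()
--     ]
--
--     # Sort layers according to hierarchy
--     def get_sort_key(layer_name):
--         mapped_name = layer_order.get(layer_name, layer_name)
--         if mapped_name in hierarchy_order:
--             return hierarchy_order.index(mapped_name)
--         else:
--             return len(hierarchy_order)  # Put unknown layers at the end
--
--     ordered_layers = sorted(filtered_layers, key=get_sort_key)
--
--     return ordered_layers
-- ===== SOURCE B (Python) =====
-- def order_layers(layer_names):
--     """Order layers according to visual hierarchy: IT, V4, V2, V1 (top to bottom)"""
--     layer_order = {
--         "layer1": "V1",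
--         "layer2": "V2",
--         "layer3": "V4",
--         "layer4": "IT",
--         "classifier": "classifier",
--     }
--     it_, v4_, v2_, v1_, unknown = [], [], [], [], []
--     for layer in layer_names:
--         if "classifier" in layer.lower():
--             continue
--         mapped = layer_order.get(layer, layer)
--         if mapped == "IT":
--             it_.append(layer)
--         elif mapped == "V4":
--             v4_.append(layer)
--         elif mapped == "V2":
--             v2_.append(layer)
--         elif mapped == "V1":
--             v1_.append(layer)
--         else:
--             unknown.append(layer)
--     return it_ + v4_ + v2_ + v1_ + unknown
-- ===== Notes on version B (the rewrite author's own statement) =====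
-- stated objective: alternative
-- what changed: Replaces A's stable sort with a computed key by a single bucketing pass that appends each non-classifier layer to one of four hierarchy buckets (IT, V4, V2, V1) or an unknown list and concatenates them, preserving the stable order without sorting.
import Mathlib
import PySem

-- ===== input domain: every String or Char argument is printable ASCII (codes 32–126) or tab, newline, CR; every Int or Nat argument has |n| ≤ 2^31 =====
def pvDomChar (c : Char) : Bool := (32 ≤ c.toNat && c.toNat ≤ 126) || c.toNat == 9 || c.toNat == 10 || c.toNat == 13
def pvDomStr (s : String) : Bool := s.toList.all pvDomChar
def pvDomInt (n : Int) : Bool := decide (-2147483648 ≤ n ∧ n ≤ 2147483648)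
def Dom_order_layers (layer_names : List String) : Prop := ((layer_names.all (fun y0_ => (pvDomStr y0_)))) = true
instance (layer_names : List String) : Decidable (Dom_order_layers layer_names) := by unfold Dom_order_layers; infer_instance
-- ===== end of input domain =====

-- B replaces A's stable sort by a single bucketing pass (four hierarchy buckets plus an
-- 'unknown' list, concatenated in hierarchy order); objective: simpler/alternative.

-- ===== PORT A =====
-- the module-level constants of order_layers (shared verbatim by both ports)
def pvLayerOrder : PySem.Dict String String :=
  PySem.Dict.ofList
    [("layer1", "V1"), ("layer2", "V2"), ("layer3", "V4"), ("layer4", "IT"),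
     ("classifier", "classifier")]

def pvHierarchyOrder : List String := ["IT", "V4", "V2", "V1"]

-- '"classifier" not in layer.lower()'
def pvKeepLayer (layer : String) : Bool :=
  !(PySem.Str.isIn "classifier" (PySem.Str.lower layer))

-- A's get_sort_key
def pvGetSortKey (layer_name : String) : Int :=
  let mapped := pvLayerOrder.getD layer_name layer_name
  if mapped ∈ pvHierarchyOrder then
    (((PySem.List.index? pvHierarchyOrder mapped).getD 0 : Nat) : Int)
  else (pvHierarchyOrder.length : Int)

def order_layers (layer_names : List String) : List String :=
  let filtered_layers := layer_names.filter pvKeepLayer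
  PySem.List.sorted filtered_layers pvGetSortKey false

-- ===== PORT B =====
-- one pass: append each kept layer to its hierarchy bucket (IT, V4, V2, V1) or to 'unknown'
def pvStepB (acc : List String × List String × List String × List String × List String)
    (layer : String) :
    List String × List String × List String × List String × List String :=
  if PySem.Str.isIn "classifier" (PySem.Str.lower layer) then acc
  else
    let mapped := pvLayerOrder.getD layer layer
    let (it_, v4_, v2_, v1_, unknown) := acc
    if mapped = "IT" then (it_ ++ [layer], v4_, v2_, v1_, unknown)
    else if mapped = "V4" then (it_, v4_ ++ [layer], v2_, v1_, unknown)
    else if mapped = "V2" then (it_, v4_, v2_ ++ [layer], v1_, unknown)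
    else if mapped = "V1" then (it_, v4_, v2_, v1_ ++ [layer], unknown)
    else (it_, v4_, v2_, v1_, unknown ++ [layer])

def order_layers_alt (layer_names : List String) : List String :=
  let s := layer_names.foldl pvStepB ([], [], [], [], [])
  s.1 ++ s.2.1 ++ s.2.2.1 ++ s.2.2.2.1 ++ s.2.2.2.2

-- ===== PRECONDITION & SPEC =====
def Spec_order_layers (layer_names : List String) (out : List String) : Prop := out = order_layers_alt layer_names
instance (layer_names : List String) (out : List String) : Decidable (Spec_order_layers layer_names out) := by unfold Spec_order_layers; infer_instance

-- ===== CLAIM (what is proved, stated in full; the proofs are below) =====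
def Claim_equal_order_layers : Prop := ∀ (layer_names : List String), Dom_order_layers layer_names → Spec_order_layers layer_names (order_layers layer_names)

-- ===== LEMMAS AND PROOFS =====

-- the bucket with key value c
def pvBucket (c : Int) (F : List String) : List String :=
  F.filter (fun y => pvGetSortKey y == c)

-- the sort key, written as the same if-chain B's pass branches on
theorem pvKey_char (x : String) :
    pvGetSortKey x =
      (let m := pvLayerOrder.getD x x
       if m = "IT" then 0 else if m = "V4" then 1 else if m = "V2" then 2
       else if m = "V1" then 3 else 4) := by
  unfold pvGetSortKey pvHierarchyOrder
  by_cases h1 : pvLayerOrder.getD x x = "IT" <;>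
  by_cases h2 : pvLayerOrder.getD x x = "V4" <;>
  by_cases h3 : pvLayerOrder.getD x x = "V2" <;>
  by_cases h4 : pvLayerOrder.getD x x = "V1" <;>
    simp_all [PySem.List.index?_eq_idxOf?, List.idxOf?, List.findIdx?, List.findIdx?.go]

theorem pvKey_bounds (x : String) : 0 ≤ pvGetSortKey x ∧ pvGetSortKey x ≤ 4 := by
  rw [pvKey_char]; dsimp only; split_ifs <;> omega

theorem pvBucket_filter_le (i c : Int) (F : List String) :
    (pvBucket i F).filter (fun y => decide (pvGetSortKey y ≤ c)) =
      if i ≤ c then pvBucket i F else [] := by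
  split_ifs with h
  · rw [List.filter_eq_self]
    intro y hy
    simp only [pvBucket, List.mem_filter, beq_iff_eq] at hy
    simpa [hy.2] using h
  · rw [List.filter_eq_nil_iff]
    intro y hy
    simp only [pvBucket, List.mem_filter, beq_iff_eq] at hy
    simp [hy.2]; omega

theorem pvBucket_filter_gt (i c : Int) (F : List String) :
    (pvBucket i F).filter (fun y => decide (c < pvGetSortKey y)) =
      if c < i then pvBucket i F else [] := by
  split_ifs with h
  · rw [List.filter_eq_self]
    intro y hy
    simp only [pvBucket, List.mem_filter, beq_iff_eq] at hy
    simpa [hy.2] using h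
  · rw [List.filter_eq_nil_iff]
    intro y hy
    simp only [pvBucket, List.mem_filter, beq_iff_eq] at hy
    simp [hy.2]; omega

theorem pvBucket_append (c : Int) (F : List String) (x : String) :
    pvBucket c (F ++ [x]) =
      pvBucket c F ++ (if pvGetSortKey x = c then [x] else []) := by
  simp only [pvBucket, List.filter_append, List.filter_cons, List.filter_nil]
  split_ifs with h <;> simp_all

-- stable insertion into a key-sorted list splits it at the insertion point
theorem pvInsertBy_sorted (x : String) (L : List String)
    (h : L.Pairwise (fun a b => pvGetSortKey a ≤ pvGetSortKey b)) :
    PySem.List.insertBy (fun a b => decide (pvGetSortKey a < pvGetSortKey b)) x L =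
      L.filter (fun y => decide (pvGetSortKey y ≤ pvGetSortKey x)) ++
        x :: L.filter (fun y => decide (pvGetSortKey x < pvGetSortKey y)) := by
  induction L with
  | nil => simp [PySem.List.insertBy]
  | cons y ys ih =>
    rcases List.pairwise_cons.mp h with ⟨hy, hys⟩
    by_cases hlt : pvGetSortKey x < pvGetSortKey y
    · have hall : ∀ z ∈ y :: ys, pvGetSortKey x < pvGetSortKey z := by
        intro z hz
        rcases List.mem_cons.mp hz with rfl | hz
        · exact hlt
        · exact lt_of_lt_of_le hlt (hy z hz)
      rw [List.filter_eq_nil_iff.mpr, List.filter_eq_self.mpr]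
      · simp [PySem.List.insertBy, hlt]
      · intro z hz; simpa using hall z hz
      · intro z hz; have := hall z hz; simp; omega
    · simp only [PySem.List.insertBy, decide_eq_true_eq, if_neg hlt]
      rw [ih hys]
      have hle : pvGetSortKey y ≤ pvGetSortKey x := by omega
      simp [hle, hlt]

theorem pvBuckets_pairwise (F : List String) :
    (pvBucket 0 F ++ pvBucket 1 F ++ pvBucket 2 F ++ pvBucket 3 F ++ pvBucket 4 F).Pairwise
      (fun a b => pvGetSortKey a ≤ pvGetSortKey b) := by
  have hb : ∀ (c : Int) (y : String), y ∈ pvBucket c F → pvGetSortKey y = c := by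
    intro c y hy
    simpa [pvBucket, List.mem_filter] using (List.mem_filter.mp hy).2
  have hp : ∀ (c : Int), (pvBucket c F).Pairwise (fun a b => pvGetSortKey a ≤ pvGetSortKey b) := by
    intro c
    apply List.pairwise_of_forall_mem_list
    intro a ha b hbm
    rw [hb c a ha, hb c b hbm]
  simp only [List.pairwise_append]
  refine ⟨⟨⟨⟨hp 0, hp 1, ?_⟩, hp 2, ?_⟩, hp 3, ?_⟩, hp 4, ?_⟩
  · intro a ha b hbm
    rw [hb 0 a ha, hb 1 b hbm]; norm_num
  · intro a ha b hbm
    rw [hb 2 b hbm]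
    rcases List.mem_append.mp ha with ha | ha
    · rw [hb 0 a ha]; norm_num
    · rw [hb 1 a ha]; norm_num
  · intro a ha b hbm
    rw [hb 3 b hbm]
    rcases List.mem_append.mp ha with ha | ha
    · rcases List.mem_append.mp ha with ha | ha
      · rw [hb 0 a ha]; norm_num
      · rw [hb 1 a ha]; norm_num
    · rw [hb 2 a ha]; norm_num
  · intro a ha b hbm
    rw [hb 4 b hbm]
    rcases List.mem_append.mp ha with ha | ha
    · rcases List.mem_append.mp ha with ha | ha
      · rcases List.mem_append.mp ha with ha | ha
        · rw [hb 0 a ha]; norm_num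
        · rw [hb 1 a ha]; norm_num
      · rw [hb 2 a ha]; norm_num
    · rw [hb 3 a ha]; norm_num

-- A's stable sort of F is the concatenation of the key buckets
theorem pvSorted_eq_buckets (F : List String) :
    PySem.List.sorted F pvGetSortKey false =
      pvBucket 0 F ++ pvBucket 1 F ++ pvBucket 2 F ++ pvBucket 3 F ++ pvBucket 4 F := by
  induction F using List.reverseRecOn with
  | nil => simp [PySem.List.sorted, pvBucket]
  | append_singleton F x ih =>
    rw [PySem.List.sorted_eq_foldl_insertBy] at ih ⊢
    rw [List.foldl_append, List.foldl_cons, List.foldl_nil, ih]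
    rw [pvInsertBy_sorted x _ (pvBuckets_pairwise F)]
    obtain ⟨h0, h4⟩ := pvKey_bounds x
    have hc : pvGetSortKey x = 0 ∨ pvGetSortKey x = 1 ∨ pvGetSortKey x = 2 ∨
        pvGetSortKey x = 3 ∨ pvGetSortKey x = 4 := by omega
    rcases hc with hc | hc | hc | hc | hc <;>
      simp [hc, List.filter_append, pvBucket_filter_le, pvBucket_filter_gt, pvBucket_append]

-- the fold of B's pass appends each bucket of the kept layers to the running buckets
theorem pvFoldB (xs : List String) :
    ∀ b0 b1 b2 b3 u,
      xs.foldl pvStepB (b0, b1, b2, b3, u) =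
        (b0 ++ pvBucket 0 (xs.filter pvKeepLayer),
         b1 ++ pvBucket 1 (xs.filter pvKeepLayer),
         b2 ++ pvBucket 2 (xs.filter pvKeepLayer),
         b3 ++ pvBucket 3 (xs.filter pvKeepLayer),
         u ++ pvBucket 4 (xs.filter pvKeepLayer)) := by
  induction xs with
  | nil => intro b0 b1 b2 b3 u; simp [pvBucket]
  | cons x xs ih =>
    intro b0 b1 b2 b3 u
    rw [List.foldl_cons]
    by_cases hk : PySem.Str.isIn "classifier" (PySem.Str.lower x) = true <;> simp at hk
    · have hstep : pvStepB (b0, b1, b2, b3, u) x = (b0, b1, b2, b3, u) := by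
        simp [pvStepB, hk]
      have hfil : (x :: xs).filter pvKeepLayer = xs.filter pvKeepLayer := by
        simp [pvKeepLayer, hk]
      rw [hstep, ih, hfil]
    · have hfil : (x :: xs).filter pvKeepLayer = x :: xs.filter pvKeepLayer := by
        simp [pvKeepLayer, hk]
      rw [hfil]
      by_cases hm1 : pvLayerOrder.getD x x = "IT"
      · have hkx : pvGetSortKey x = 0 := by rw [pvKey_char]; simp [hm1]
        have hstep : pvStepB (b0, b1, b2, b3, u) x = (b0 ++ [x], b1, b2, b3, u) := by
          simp [pvStepB, hk, hm1]
        rw [hstep, ih]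
        simp [pvBucket, hkx]
      · by_cases hm2 : pvLayerOrder.getD x x = "V4"
        · have hkx : pvGetSortKey x = 1 := by rw [pvKey_char]; simp [hm2]
          have hstep : pvStepB (b0, b1, b2, b3, u) x = (b0, b1 ++ [x], b2, b3, u) := by
            simp [pvStepB, hk, hm1, hm2]
          rw [hstep, ih]
          simp [pvBucket, hkx]
        · by_cases hm3 : pvLayerOrder.getD x x = "V2"
          · have hkx : pvGetSortKey x = 2 := by rw [pvKey_char]; simp [hm1, hm2, hm3]
            have hstep : pvStepB (b0, b1, b2, b3, u) x = (b0, b1, b2 ++ [x], b3, u) := by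
              simp [pvStepB, hk, hm1, hm2, hm3]
            rw [hstep, ih]
            simp [pvBucket, hkx]
          · by_cases hm4 : pvLayerOrder.getD x x = "V1"
            · have hkx : pvGetSortKey x = 3 := by rw [pvKey_char]; simp [hm1, hm2, hm3, hm4]
              have hstep : pvStepB (b0, b1, b2, b3, u) x = (b0, b1, b2, b3 ++ [x], u) := by
                simp [pvStepB, hk, hm1, hm2, hm3, hm4]
              rw [hstep, ih]
              simp [pvBucket, hkx]
            · have hkx : pvGetSortKey x = 4 := by rw [pvKey_char]; simp [hm1, hm2, hm3, hm4]
              have hstep : pvStepB (b0, b1, b2, b3, u) x = (b0, b1, b2, b3, u ++ [x]) := by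
                simp [pvStepB, hk, hm1, hm2, hm3, hm4]
              rw [hstep, ih]
              simp [pvBucket, hkx]

-- ===== VERDICT (by name: the statement is the Claim_ definition above) =====
theorem order_layers_spec : Claim_equal_order_layers := by
  intro ls _
  unfold Spec_order_layers order_layers order_layers_alt
  rw [pvFoldB, pvSorted_eq_buckets]
  simp
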